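-- pv_equiv track=rewrite | github.com/rimas-kudelis/aoc | 2024/day8.py | collect_antennas_by_frequency
-- ===== SOURCE A (Python) =====
-- def collect_antennas_by_frequency(map):
--     antennas = {}
--     for row_index, row in enumerate(map):
--         for col_index, frequency in enumerate(row):
--             if frequency == '.':
--                 continue
--             if frequency not in antennas:
--                 antennas[frequency] = [(row_index, col_index)]
--             else:
--                 antennas[frequency].append((row_index, col_index))
--     return antennas
-- ===== SOURCE B (Python) =====
-- def collect_antennas_by_frequency(map):
--     cells = [(freq, (row_index, col_index))
--              for row_index, row in enumerate(map)
--              for col_index, freq in enumerate(row)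
--              if freq != '.']
--     return {f: [pos for g, pos in cells if g == f]
--             for f in dict.fromkeys(g for g, _ in cells)}
-- ===== Notes on version B (the rewrite author's own statement) =====
-- stated objective: alternative
-- what changed: Replaces the incremental dict-building loop with a flatten-then-group decomposition: one flat comprehension collects (frequency, (r, c)) cells, dict.fromkeys gives the first-occurrence frequency order, and a per-frequency filter builds each group.
import Mathlib
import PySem

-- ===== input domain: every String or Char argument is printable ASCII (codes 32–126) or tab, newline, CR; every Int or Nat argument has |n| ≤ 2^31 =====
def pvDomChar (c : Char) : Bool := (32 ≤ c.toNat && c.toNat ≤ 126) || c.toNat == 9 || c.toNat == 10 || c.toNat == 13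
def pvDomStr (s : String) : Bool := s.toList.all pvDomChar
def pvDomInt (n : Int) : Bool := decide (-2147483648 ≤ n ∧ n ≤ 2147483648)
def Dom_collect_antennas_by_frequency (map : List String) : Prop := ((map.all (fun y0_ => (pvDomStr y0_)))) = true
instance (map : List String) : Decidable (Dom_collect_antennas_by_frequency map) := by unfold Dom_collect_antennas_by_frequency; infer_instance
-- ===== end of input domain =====

-- B replaces the incremental dict-building loop by flatten + dedup + per-frequency filter (alternative decomposition, same results).
-- ===== PORT A =====
def collect_antennas_by_frequency (map : List String) : List (String × List (Int × Int)) :=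
  ((PySem.List.enumerate map).foldl (fun antennas rr =>
    (PySem.List.enumerate rr.2.toList).foldl (fun antennas cf =>
      if cf.2 == '.' then antennas
      else
        if antennas.contains (String.ofList [cf.2]) = false then
          antennas.insert (String.ofList [cf.2]) [(rr.1, cf.1)]
        else
          antennas.insert (String.ofList [cf.2]) (antennas.getD (String.ofList [cf.2]) [] ++ [(rr.1, cf.1)])
      ) antennas) PySem.Dict.empty).items

-- ===== PORT B =====
def collect_antennas_by_frequency_alt (map : List String) : List (String × List (Int × Int)) :=
  let cells := (PySem.List.enumerate map).flatMap (fun rr =>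
      (PySem.List.enumerate rr.2.toList).filterMap (fun cf =>
        if cf.2 == '.' then none else some (String.ofList [cf.2], (rr.1, cf.1))))
  (PySem.List.dedup (cells.map (·.1))).map
    (fun f => (f, (cells.filter (fun gp => gp.1 == f)).map (·.2)))

-- ===== PRECONDITION & SPEC =====
def Spec_collect_antennas_by_frequency (map : List String) (out : List (String × List (Int × Int))) : Prop := out = collect_antennas_by_frequency_alt map
instance (map : List String) (out : List (String × List (Int × Int))) : Decidable (Spec_collect_antennas_by_frequency map out) := by unfold Spec_collect_antennas_by_frequency; infer_instance

-- ===== CLAIM (what is proved, stated in full; the proofs are below) =====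
def Claim_equal_collect_antennas_by_frequency : Prop := ∀ (map : List String), Dom_collect_antennas_by_frequency map → Spec_collect_antennas_by_frequency map (collect_antennas_by_frequency map)

-- ===== LEMMAS AND PROOFS =====

-- the step of A's loop, on one flattened cell
def pvStep (d : PySem.Dict String (List (Int × Int))) (c : String × (Int × Int)) : PySem.Dict String (List (Int × Int)) :=
  d.modify c.1 [] (· ++ [c.2])

-- A's branching step equals Dict.modify
lemma pvStep_eq (d : PySem.Dict String (List (Int × Int))) (k : String) (p : Int × Int) :
    (if d.contains k = false then d.insert k [p] else d.insert k (d.getD k [] ++ [p]))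
      = pvStep d (k, p) := by
  unfold pvStep
  by_cases h : d.contains k = true
  · simp [h, PySem.Dict.modify]
  · simp at h
    simp [h, PySem.Dict.modify, PySem.Dict.getD_of_not_contains _ _ h]

-- a fold that skips on `none` is a fold over the filterMap
lemma pvFoldl_filterMap {α β γ : Type} (g : α → Option β) (f : γ → β → γ) :
    ∀ (l : List α) (init : γ),
      l.foldl (fun acc x => match g x with | none => acc | some y => f acc y) init
        = (l.filterMap g).foldl f init := by
  intro l
  induction l with
  | nil => intro init; rfl
  | cons x t ih =>
    intro init
    cases h : g x <;> simp [h, ih]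

lemma pvFoldl_flatMap {α β γ : Type} (g : α → List β) (f : γ → β → γ) :
    ∀ (l : List α) (init : γ),
      (l.flatMap g).foldl f init = l.foldl (fun acc x => (g x).foldl f acc) init := by
  intro l
  induction l with
  | nil => intro init; rfl
  | cons x t ih => intro init; simp [List.flatMap_cons, List.foldl_append, ih]

-- A's nested loop is the pvStep fold over the flattened cells
lemma pvA_eq_foldl_cells (map : List String) :
    collect_antennas_by_frequency map
      = (((PySem.List.enumerate map).flatMap (fun rr =>
            (PySem.List.enumerate rr.2.toList).filterMap (fun cf =>
              if cf.2 == '.' then none else some (String.ofList [cf.2], (rr.1, cf.1))))).foldl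
          pvStep PySem.Dict.empty).items := by
  unfold collect_antennas_by_frequency
  rw [pvFoldl_flatMap]
  congr 1
  apply PySem.List.foldl_congr_mem
  intro acc rr _
  rw [← pvFoldl_filterMap]
  apply PySem.List.foldl_congr_mem
  intro d cf _
  by_cases h : cf.2 == '.'
  · simp [h]
  · simp only [h]
    exact pvStep_eq d (String.ofList [cf.2]) (rr.1, cf.1)

-- the pvStep fold from empty, characterised
lemma pvFoldl_step_items (cells : List (String × (Int × Int))) :
    (cells.foldl pvStep PySem.Dict.empty).items
      = (PySem.List.dedup (cells.map (·.1))).map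
          (fun f => (f, (cells.filter (fun gp => gp.1 == f)).map (·.2))) := by
  have hnd : (cells.foldl pvStep PySem.Dict.empty).keys.Nodup := by
    unfold pvStep
    exact PySem.Dict.nodup_keys_foldl_modify_key cells (fun c => c.1) [] (fun d c => (· ++ [c.2])) PySem.Dict.empty (by simp)
  have hkeys : (cells.foldl pvStep PySem.Dict.empty).keys = PySem.List.dedup (cells.map (·.1)) := by
    unfold pvStep
    rw [PySem.Dict.keys_foldl_modify_key]
    simp only [PySem.List.dedup_eq_ofList]
    rfl
  rw [PySem.Dict.items_eq_map_keys _ hnd ([] : List (Int × Int)), hkeys]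
  apply List.map_congr_left
  intro f _
  have hget : (cells.foldl pvStep PySem.Dict.empty).getD f [] = (cells.filter (fun gp => gp.1 == f)).map (·.2) := by
    unfold pvStep
    rw [PySem.Dict.getD_foldl_modify_append]
    simp [PySem.Dict.getD_empty]
  rw [hget]

-- ===== VERDICT (by name: the statement is the Claim_ definition above) =====
theorem collect_antennas_by_frequency_spec : Claim_equal_collect_antennas_by_frequency := by
  intro map _
  unfold Spec_collect_antennas_by_frequency collect_antennas_by_frequency_alt
  rw [pvA_eq_foldl_cells, pvFoldl_step_items]
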